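-- pv_equiv track=rewrite | github.com/Glitch1258/MyCode-networkInference | netInf.py | group_into_cascades
-- ===== SOURCE A (Python) =====
-- def group_into_cascades(edges, window_size=604800):  # 7 days in seconds
--     """Group email edges into time-window cascades"""
--     if not edges:
--         return []
--
--     edges_sorted = sorted(edges, key=lambda x: x[2])
--     cascades = []
--     current_window = []
--     start_time = edges_sorted[0][2]
--
--     for u, v, t in edges_sorted:
--         if t - start_time <= window_size:
--             current_window.append((u, t))
--             current_window.append((v, t))
--         else:
--             if current_window:
--                 # Group by node, keep earliest timestamp per node
--                 node_times = {}
--                 for node, ts in current_window: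
--                     if node not in node_times or ts < node_times[node]:
--                         node_times[node] = ts
--                 cascade = sorted([(n, ts) for n, ts in node_times.items()], key=lambda x: x[1])
--                 cascades.append(cascade)
--             current_window = [(u, t), (v, t)]
--             start_time = t
--
--     # Add the last window
--     if current_window:
--         node_times = {}
--         for node, ts in current_window:
--             if node not in node_times or ts < node_times[node]:
--                 node_times[node] = ts
--         cascade = sorted([(n, ts) for n, ts in node_times.items()], key=lambda x: x[1])
--         cascades.append(cascade)
--
--     return cascades
-- ===== SOURCE B (Python) =====
-- def group_into_cascades(edges, window_size=604800):  # 7 days in seconds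
--     """Group email edges into time-window cascades"""
--     es = sorted(edges, key=lambda x: x[2])
--     cascades = []
--     while es:
--         t0 = es[0][2]
--         k = 1
--         while k < len(es) and es[k][2] - t0 <= window_size:
--             k += 1
--         window, es = es[:k], es[k:]
--         # es is time-sorted, so within a window the FIRST occurrence of a node
--         # already carries its earliest timestamp, and first-seen order is
--         # nondecreasing in time: no per-node min dict and no sort are needed.
--         seen = set()
--         cascade = []
--         for u, v, t in window:
--             if u not in seen:
--                 seen.add(u)
--                 cascade.append((u, t))
--             if v not in seen:
--                 seen.add(v)
--                 cascade.append((v, t))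
--         cascades.append(cascade)
--     return cascades
-- ===== Notes on version B (the rewrite author's own statement) =====
-- stated objective: alternative
-- what changed: B slices the sorted edges into maximal windows by index and summarizes each window by first-seen dedup into an ordered set, exploiting sortedness to eliminate A's per-node min dict and the per-window sort entirely.
import Mathlib
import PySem

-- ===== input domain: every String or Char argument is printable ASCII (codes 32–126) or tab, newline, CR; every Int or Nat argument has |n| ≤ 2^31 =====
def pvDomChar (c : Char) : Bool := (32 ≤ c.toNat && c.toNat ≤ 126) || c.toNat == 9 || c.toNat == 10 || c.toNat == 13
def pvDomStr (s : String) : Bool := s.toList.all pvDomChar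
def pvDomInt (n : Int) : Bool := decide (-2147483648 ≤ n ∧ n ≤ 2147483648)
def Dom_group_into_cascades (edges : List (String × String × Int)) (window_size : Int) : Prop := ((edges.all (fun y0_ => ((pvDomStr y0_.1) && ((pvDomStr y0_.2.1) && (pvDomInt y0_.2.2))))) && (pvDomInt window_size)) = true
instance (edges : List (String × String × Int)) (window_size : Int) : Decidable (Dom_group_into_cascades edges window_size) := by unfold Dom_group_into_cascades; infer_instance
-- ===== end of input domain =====

-- B slices the time-sorted edges into maximal windows and summarizes each by first-seen dedup,
-- using sortedness to drop A's per-node min dict and per-window sort; objective: alternative.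

-- ===== PORT A =====
def group_into_cascades (edges : List (String × String × Int)) (window_size : Int) : List (List (String × Int)) :=
  if edges = [] then []
  else
    let es := PySem.List.sorted edges (fun x => x.2.2)
    let start_time := match es with | [] => 0 | e :: _ => e.2.2
    let st := es.foldl (fun (s : List (List (String × Int)) × List (String × Int) × Int) e =>
      let (cascades, cur, start) := s
      let (u, v, t) := e
      if t - start ≤ window_size then
        (cascades, cur ++ [(u, t), (v, t)], start)
      else
        let cascades :=
          if cur ≠ [] then
            let node_times := cur.foldl (fun (d : PySem.Dict String Int) p =>
              match d.get? p.1 with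
              | none => d.insert p.1 p.2
              | some old => if p.2 < old then d.insert p.1 p.2 else d) PySem.Dict.empty
            cascades ++ [PySem.List.sorted node_times.items (fun x => x.2)]
          else cascades
        (cascades, [(u, t), (v, t)], t)) ([], [], start_time)
    let (cascades, cur, _) := st
    if cur ≠ [] then
      let node_times := cur.foldl (fun (d : PySem.Dict String Int) p =>
        match d.get? p.1 with
        | none => d.insert p.1 p.2
        | some old => if p.2 < old then d.insert p.1 p.2 else d) PySem.Dict.empty
      cascades ++ [PySem.List.sorted node_times.items (fun x => x.2)]
    else cascades

-- ===== PORT B =====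
-- inner while loop of Source B: split off the maximal run with t - t0 ≤ window_size
-- (the window is es[:k] = head :: first component; es[k:] is the second component)
def pvRun (window_size t0 : Int) : List (String × String × Int) → List (String × String × Int) × List (String × String × Int)
  | [] => ([], [])
  | e :: rest =>
      if e.2.2 - t0 ≤ window_size then
        let (a, b) := pvRun window_size t0 rest
        (e :: a, b)
      else ([], e :: rest)

theorem pvRun_snd_length (window_size t0 : Int) (l : List (String × String × Int)) :
    (pvRun window_size t0 l).2.length ≤ l.length := by
  induction l with
  | nil => simp [pvRun]
  | cons e rest ih =>
    simp only [pvRun]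
    split
    · simpa using ih.trans (Nat.le_succ _)
    · simp

-- outer while loop of Source B over the shrinking es
def pvWindows (window_size : Int) : List (String × String × Int) → List (List (String × String × Int))
  | [] => []
  | e :: rest =>
      let p := pvRun window_size e.2.2 rest
      (e :: p.1) :: pvWindows window_size p.2
termination_by l => l.length
decreasing_by
  simpa using Nat.lt_succ_of_le (pvRun_snd_length window_size e.2.2 rest)

-- the for-loop of Source B: first-seen dedup of a window's (node, t) events
def pvDedupWindow (w : List (String × String × Int)) : List (String × Int) :=
  (w.foldl (fun (s : PySem.Set String × List (String × Int)) e =>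
      let (seen, cascade) := s
      let (u, v, t) := e
      let (seen, cascade) :=
        if seen.contains u then (seen, cascade)
        else (PySem.Set.add seen u, cascade ++ [(u, t)])
      if seen.contains v then (seen, cascade)
      else (PySem.Set.add seen v, cascade ++ [(v, t)])) (PySem.Set.empty, [])).2

def group_into_cascades_alt (edges : List (String × String × Int)) (window_size : Int) : List (List (String × Int)) :=
  (pvWindows window_size (PySem.List.sorted edges (fun x => x.2.2))).map pvDedupWindow

-- ===== PRECONDITION & SPEC =====
def Spec_group_into_cascades (edges : List (String × String × Int)) (window_size : Int) (out : List (List (String × Int))) : Prop := out = group_into_cascades_alt edges window_size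
instance (edges : List (String × String × Int)) (window_size : Int) (out : List (List (String × Int))) : Decidable (Spec_group_into_cascades edges window_size out) := by unfold Spec_group_into_cascades; infer_instance

-- ===== CLAIM (what is proved, stated in full; the proofs are below) =====
def Claim_equal_group_into_cascades : Prop := ∀ (edges : List (String × String × Int)) (window_size : Int), Dom_group_into_cascades edges window_size → Spec_group_into_cascades edges window_size (group_into_cascades edges window_size)

-- ===== LEMMAS AND PROOFS =====

def pvFoldMin (l : List (String × Int)) (d : PySem.Dict String Int) : PySem.Dict String Int :=
  l.foldl (fun d p => match d.get? p.1 with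
    | none => d.insert p.1 p.2
    | some old => if p.2 < old then d.insert p.1 p.2 else d) d

def pvSeen (l : List (String × Int)) (s : PySem.Set String × List (String × Int)) : PySem.Set String × List (String × Int) :=
  l.foldl (fun s p => if s.1.contains p.1 then s else (PySem.Set.add s.1 p.1, s.2 ++ [p])) s

theorem pvCore : ∀ (l : List (String × Int)) (d : PySem.Dict String Int) (seen : PySem.Set String),
    l.Pairwise (fun p q => p.2 ≤ q.2) →
    (∀ p ∈ d.items, ∀ q ∈ l, p.2 ≤ q.2) →
    (∀ k, d.contains k = seen.contains k) →
    d.keys.Nodup →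
    (pvFoldMin l d).items = (pvSeen l (seen, d.items)).2
  | [], d, seen, _, _, _, _ => rfl
  | p :: rest, d, seen, h1, h2, h3, h4 => by
    simp only [pvFoldMin, pvSeen, List.foldl_cons]
    by_cases hc : d.contains p.1 = true
    · rw [PySem.Dict.contains_eq_isSome_get?] at hc
      obtain ⟨old, hold⟩ := Option.isSome_iff_exists.mp hc
      have hmem := PySem.Dict.mem_items_of_get?_eq_some d hold
      have hle : old ≤ p.2 := h2 _ hmem p (List.mem_cons_self ..)
      have hs : seen.contains p.1 = true := by
        rw [← h3, PySem.Dict.contains_eq_isSome_get?]; exact hc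
      rw [hold, hs]
      simp only [not_lt.mpr hle, if_false, if_true]
      have := pvCore rest d seen h1.tail
        (fun q hq r hr => h2 q hq r (List.mem_cons_of_mem p hr)) h3 h4
      simpa [pvFoldMin, pvSeen, not_lt.mpr hle] using this
    · have hget : d.get? p.1 = none := by
        rw [PySem.Dict.contains_eq_isSome_get?] at hc; simpa using hc
      have hs : seen.contains p.1 = false := by rw [← h3]; simpa using hc
      rw [hget, hs]
      simp only [Bool.false_eq_true, if_false]
      have hitems : (d.insert p.1 p.2).items = d.items ++ [(p.1, p.2)] :=
        PySem.Dict.items_insert_of_not_contains d p.2 (by simpa using hc)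
      have := pvCore rest (d.insert p.1 p.2) (PySem.Set.add seen p.1) h1.tail
        (by
          intro q hq r hr
          rw [hitems] at hq
          rcases List.mem_append.mp hq with hq | hq
          · exact h2 q hq r (List.mem_cons_of_mem p hr)
          · simp only [List.mem_singleton] at hq
            subst hq
            exact List.rel_of_pairwise_cons h1 hr)
        (by
          intro k
          rw [PySem.Dict.contains_insert d p.1 k p.2, h3 k]
          have hsm : p.1 ∉ seen := by simpa [PySem.Set.contains] using hs
          by_cases hk : k = p.1
          · subst hk; simp [PySem.Set.add, hsm]
          · simp [PySem.Set.add, hsm, hk])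
        (PySem.Dict.nodup_keys_insert d p.1 p.2 h4)
      simpa [pvFoldMin, pvSeen, hitems] using this

def pvFlat (w : List (String × String × Int)) : List (String × Int) :=
  w.flatMap (fun e => [(e.1, e.2.2), (e.2.1, e.2.2)])

def pvSum (l : List (String × Int)) : List (String × Int) :=
  PySem.List.sorted (pvFoldMin l PySem.Dict.empty).items (fun x => x.2)

theorem pvSeen_sublist : ∀ (l : List (String × Int)) (s : PySem.Set String) (a : List (String × Int)),
    (pvSeen l (s, a)).2.Sublist (a ++ l)
  | [], s, a => by simp [pvSeen]
  | p :: rest, s, a => by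
    simp only [pvSeen, List.foldl_cons]
    by_cases hc : s.contains p.1 = true
    · rw [hc]
      simp only [if_true]
      have := pvSeen_sublist rest s a
      exact this.trans (by simp)
    · simp only [Bool.not_eq_true] at hc
      rw [hc]
      simp only [Bool.false_eq_true, if_false]
      have := pvSeen_sublist rest (PySem.Set.add s p.1) (a ++ [p])
      simpa [pvSeen] using this

theorem pvFlat_pairwise (w : List (String × String × Int))
    (h : w.Pairwise (fun a b => a.2.2 ≤ b.2.2)) :
    (pvFlat w).Pairwise (fun p q => p.2 ≤ q.2) := by
  induction w with
  | nil => simp [pvFlat]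
  | cons e rest ih =>
    simp only [pvFlat, List.flatMap_cons] at *
    rw [List.pairwise_append]
    refine ⟨by simp, ih h.tail, ?_⟩
    intro p hp q hq
    simp only [List.mem_cons, List.not_mem_nil, or_false] at hp
    simp only [List.mem_flatMap, List.mem_cons, List.not_mem_nil, or_false] at hq
    obtain ⟨f, hf, hqf⟩ := hq
    have hq2 : q.2 = f.2.2 := by rcases hqf with h | h <;> simp [h]
    have hp2 : p.2 = e.2.2 := by rcases hp with h | h <;> simp [h]
    rw [hp2, hq2]
    exact List.rel_of_pairwise_cons h hf

-- bridge: B's edge loop is the pair loop over the flattened window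
theorem pvDedup_eq_pvSeen_aux : ∀ (w : List (String × String × Int)) (s : PySem.Set String × List (String × Int)),
    w.foldl (fun (s : PySem.Set String × List (String × Int)) e =>
      let (seen, cascade) := s
      let (u, v, t) := e
      let (seen, cascade) :=
        if seen.contains u then (seen, cascade)
        else (PySem.Set.add seen u, cascade ++ [(u, t)])
      if seen.contains v then (seen, cascade)
      else (PySem.Set.add seen v, cascade ++ [(v, t)])) s = pvSeen (pvFlat w) s
  | [], s => rfl
  | e :: rest, s => by
    simp only [List.foldl_cons, pvFlat, List.flatMap_cons, pvSeen, List.foldl_append, List.foldl_cons, List.foldl_nil]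
    have := pvDedup_eq_pvSeen_aux rest
    simp only [pvFlat, pvSeen] at this
    rw [this]

theorem pvDedup_eq_pvSeen (w : List (String × String × Int)) :
    pvDedupWindow w = (pvSeen (pvFlat w) (PySem.Set.empty, [])).2 := by
  rw [pvDedupWindow, pvDedup_eq_pvSeen_aux]

theorem pvSum_flat_eq_dedup (w : List (String × String × Int))
    (h : w.Pairwise (fun a b => a.2.2 ≤ b.2.2)) :
    pvSum (pvFlat w) = pvDedupWindow w := by
  have hflat := pvFlat_pairwise w h
  have hcore := pvCore (pvFlat w) PySem.Dict.empty PySem.Set.empty hflat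
    (by intro p hp; simp only [show (PySem.Dict.empty : PySem.Dict String Int).items = [] from rfl] at hp; cases hp)
    (by intro k; rfl)
    (by simp only [show ((PySem.Dict.empty : PySem.Dict String Int)).keys = [] from rfl]; exact List.nodup_nil)
  have hsub := pvSeen_sublist (pvFlat w) PySem.Set.empty []
  simp only [List.nil_append] at hsub
  have hpw : (pvSeen (pvFlat w) (PySem.Set.empty, [])).2.Pairwise (fun p q => p.2 ≤ q.2) :=
    hflat.sublist hsub
  rw [pvSum, pvDedup_eq_pvSeen]
  have : (PySem.Dict.empty : PySem.Dict String Int).items = [] := rfl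
  rw [this] at hcore
  rw [hcore]
  exact PySem.List.sorted_eq_self_of_pairwise _ _ hpw

def pvAstep (window_size : Int) (s : List (List (String × Int)) × List (String × Int) × Int)
    (e : String × String × Int) : List (List (String × Int)) × List (String × Int) × Int :=
  let (cascades, cur, start) := s
  let (u, v, t) := e
  if t - start ≤ window_size then
    (cascades, cur ++ [(u, t), (v, t)], start)
  else
    let cascades :=
      if cur ≠ [] then
        let node_times := cur.foldl (fun (d : PySem.Dict String Int) p =>
          match d.get? p.1 with
          | none => d.insert p.1 p.2
          | some old => if p.2 < old then d.insert p.1 p.2 else d) PySem.Dict.empty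
        cascades ++ [PySem.List.sorted node_times.items (fun x => x.2)]
      else cascades
    (cascades, [(u, t), (v, t)], t)

def pvAflush (s : List (List (String × Int)) × List (String × Int) × Int) : List (List (String × Int)) :=
  if s.2.1 ≠ [] then s.1 ++ [pvSum s.2.1] else s.1

theorem pvFlat_ne_nil (w : List (String × String × Int)) (h : w ≠ []) : pvFlat w ≠ [] := by
  cases w with
  | nil => simp at h
  | cons e rest => simp [pvFlat]

theorem pvFlat_append_singleton (w : List (String × String × Int)) (e : String × String × Int) :
    pvFlat (w ++ [e]) = pvFlat w ++ [(e.1, e.2.2), (e.2.1, e.2.2)] := by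
  simp [pvFlat]

theorem pvWin (ws : Int) : ∀ (l : List (String × String × Int)) (C : List (List (String × Int)))
    (curE : List (String × String × Int)) (t0 : Int), curE ≠ [] →
    pvAflush (l.foldl (pvAstep ws) (C, pvFlat curE, t0))
      = C ++ ((curE ++ (pvRun ws t0 l).1) :: pvWindows ws (pvRun ws t0 l).2).map (fun w => pvSum (pvFlat w))
  | [], C, curE, t0, hne => by
    simp [pvRun, pvWindows, pvAflush, pvFlat_ne_nil curE hne]
  | (u, v, t) :: rest, C, curE, t0, hne => by
    simp only [List.foldl_cons, pvRun]
    by_cases h : t - t0 ≤ ws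
    · rw [if_pos h]
      have hstep : pvAstep ws (C, pvFlat curE, t0) (u, v, t) = (C, pvFlat (curE ++ [(u, v, t)]), t0) := by
        simp only [pvAstep]
        rw [if_pos h, pvFlat_append_singleton]
      rw [hstep]
      have := pvWin ws rest C (curE ++ [(u, v, t)]) t0 (by simp)
      rw [this]
      simp [List.append_assoc]
    · rw [if_neg h]
      have hstep : pvAstep ws (C, pvFlat curE, t0) (u, v, t)
          = (C ++ [pvSum (pvFlat curE)], pvFlat [(u, v, t)], t) := by
        simp only [pvAstep, if_neg h, pvFlat_ne_nil curE hne, ne_eq, not_false_iff, if_true]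
        rfl
      rw [hstep]
      have := pvWin ws rest (C ++ [pvSum (pvFlat curE)]) [(u, v, t)] t (by simp)
      rw [this]
      simp [pvWindows]

theorem pvRun_append (ws t0 : Int) : ∀ (l : List (String × String × Int)),
    (pvRun ws t0 l).1 ++ (pvRun ws t0 l).2 = l
  | [] => rfl
  | e :: rest => by
    simp only [pvRun]
    by_cases h : e.2.2 - t0 ≤ ws
    · rw [if_pos h]
      simpa using pvRun_append ws t0 rest
    · rw [if_neg h]
      simp

theorem pvWindows_sublist (ws : Int) : ∀ (l : List (String × String × Int)),
    ∀ w ∈ pvWindows ws l, w.Sublist l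
  | [] => by simp [pvWindows]
  | e :: rest => by
    intro w hw
    rw [pvWindows] at hw
    rcases List.mem_cons.mp hw with h | h
    · subst h
      refine List.Sublist.cons₂ e ?_
      conv_rhs => rw [← pvRun_append ws e.2.2 rest]
      exact List.sublist_append_left _ _
    · have hb : (pvRun ws e.2.2 rest).2.Sublist rest := by
        conv_rhs => rw [← pvRun_append ws e.2.2 rest]
        exact List.sublist_append_right _ _
      exact ((pvWindows_sublist ws (pvRun ws e.2.2 rest).2 w h).trans hb).trans (List.sublist_cons_self e rest)
termination_by l => l.length
decreasing_by
  simpa using Nat.lt_succ_of_le (pvRun_snd_length ws e.2.2 rest)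

theorem pv_main (edges : List (String × String × Int)) (ws : Int) :
    group_into_cascades edges ws = group_into_cascades_alt edges ws := by
  by_cases he : edges = []
  · subst he
    simp [group_into_cascades, group_into_cascades_alt,
      show PySem.List.sorted ([] : List (String × String × Int)) (fun x => x.2.2) = [] from rfl, pvWindows]
  · have hA : group_into_cascades edges ws
        = pvAflush ((PySem.List.sorted edges (fun x => x.2.2)).foldl (pvAstep ws)
            ([], [], (match PySem.List.sorted edges (fun x => x.2.2) with | [] => 0 | e :: _ => e.2.2))) := by
      rw [group_into_cascades, if_neg he]
      rfl
    obtain ⟨e0, rest, hes⟩ : ∃ e0 rest, PySem.List.sorted edges (fun x => x.2.2) = e0 :: rest := by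
      have : PySem.List.sorted edges (fun x => x.2.2) ≠ [] := by
        simp [PySem.List.sorted_eq_nil_iff, he]
      exact List.exists_cons_of_ne_nil this
    have hfirst : pvAstep ws ([], [], e0.2.2) e0 = ([], pvFlat [e0], e0.2.2) := by
      obtain ⟨u, v, t⟩ := e0
      simp only [pvAstep]
      by_cases hw : t - t ≤ ws
      · rw [if_pos hw]; rfl
      · rw [if_neg hw]; rfl
    have hsorted : (e0 :: rest).Pairwise (fun a b => a.2.2 ≤ b.2.2) := by
      rw [← hes]; exact PySem.List.sorted_pairwise edges _
    rw [hA, hes]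
    simp only [List.foldl_cons, hfirst]
    rw [pvWin ws rest [] [e0] e0.2.2 (by simp)]
    rw [group_into_cascades_alt, hes]
    rw [pvWindows]
    simp only [List.nil_append, List.map_cons, List.singleton_append]
    have hwin : ∀ w ∈ (e0 :: (pvRun ws e0.2.2 rest).1) :: pvWindows ws (pvRun ws e0.2.2 rest).2,
        w.Pairwise (fun a b => a.2.2 ≤ b.2.2) := by
      intro w hw
      have : w.Sublist (e0 :: rest) := by
        rcases List.mem_cons.mp hw with h | h
        · subst h
          refine List.Sublist.cons₂ e0 ?_
          conv_rhs => rw [← pvRun_append ws e0.2.2 rest]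
          exact List.sublist_append_left _ _
        · have hb : (pvRun ws e0.2.2 rest).2.Sublist rest := by
            conv_rhs => rw [← pvRun_append ws e0.2.2 rest]
            exact List.sublist_append_right _ _
          exact ((pvWindows_sublist ws _ w h).trans hb).trans (List.sublist_cons_self e0 rest)
      exact hsorted.sublist this
    congr 1
    · exact pvSum_flat_eq_dedup _ (hwin _ (List.mem_cons_self ..))
    · exact List.map_congr_left fun w hw => pvSum_flat_eq_dedup w (hwin w (List.mem_cons_of_mem _ hw))

-- ===== VERDICT (by name: the statement is the Claim_ definition above) =====
theorem group_into_cascades_spec : Claim_equal_group_into_cascades := by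
  intro edges window_size _
  unfold Spec_group_into_cascades
  exact pv_main edges window_size
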